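-- pv_equiv track=rewrite | github.com/dhimasardinata/esp8266-sensor-node | scripts/patch_header.py | generate_cpp_array
-- ===== SOURCE A (Python) =====
-- def generate_cpp_array(name, data):
--     decl = []
--
--     # Header line to match existing format style exactly
--     decl.append(f"const uint8_t {name}[] PROGMEM __attribute__((aligned(4))) = {{")
--
--     line = "  "
--     for i, byte in enumerate(data):
--         line += f"0x{byte:02x}, "
--         if (i + 1) % 16 == 0:
--             decl.append(line)
--             line = "  "
--     if line.strip():
--         decl.append(line.rstrip(", "))
--     decl.append("};")
--
--     # Metadata variables
--     decl.append(f"const size_t {name}_LEN = {len(data)};")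
--     decl.append(f'const char {name}_MIME[] = "text/html";')
--     decl.append(f"const bool {name}_GZIPPED = true;")
--
--     return "\n".join(decl)
-- ===== SOURCE B (Python) =====
-- def generate_cpp_array(name, data):
--     # Chunk the data into 16-byte rows instead of a running accumulator with a modulo check.
--     chunks = [data[i:i + 16] for i in range(0, len(data), 16)]
--     rows = [
--         "  " + "".join(f"0x{b:02x}, " for b in c) if len(c) == 16
--         else "  " + ", ".join(f"0x{b:02x}" for b in c)
--         for c in chunks
--     ]
--     head = f"const uint8_t {name}[] PROGMEM __attribute__((aligned(4))) = {{"
--     tail = [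
--         "};",
--         f"const size_t {name}_LEN = {len(data)};",
--         f'const char {name}_MIME[] = "text/html";',
--         f"const bool {name}_GZIPPED = true;",
--     ]
--     return "\n".join([head, *rows, *tail])
-- ===== Notes on version B (the rewrite author's own statement) =====
-- stated objective: alternative
-- what changed: B slices the data into 16-byte chunks up front and renders each chunk as a row (joining the partial last chunk with ', ' so no rstrip and no running line accumulator is needed), instead of A's single flat loop with a line accumulator and an (i+1)%16 modulo check.
import Mathlib
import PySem

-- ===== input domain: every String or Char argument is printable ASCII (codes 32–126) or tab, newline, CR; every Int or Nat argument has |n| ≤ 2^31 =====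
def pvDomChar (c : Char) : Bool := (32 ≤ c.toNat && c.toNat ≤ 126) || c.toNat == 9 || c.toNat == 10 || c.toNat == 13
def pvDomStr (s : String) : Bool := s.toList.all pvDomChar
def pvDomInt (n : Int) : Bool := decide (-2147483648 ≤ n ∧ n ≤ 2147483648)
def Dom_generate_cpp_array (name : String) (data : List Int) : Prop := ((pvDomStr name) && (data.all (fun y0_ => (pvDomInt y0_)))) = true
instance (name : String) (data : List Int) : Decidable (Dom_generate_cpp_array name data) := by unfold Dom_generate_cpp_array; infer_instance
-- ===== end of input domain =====

-- B re-implements A by slicing the data into 16-byte chunks and rendering each chunk as a row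
-- (the partial last row joined with ", " so no rstrip is needed), instead of A's flat loop with a
-- running line accumulator and an (i+1)%16 check; objective: alternative decomposition, same cost.

-- ===== PORT A =====
-- shared low-level helper: Python's f"{b:02x}" (lowercase hex, zero-padded to width 2, '-' sign first)
def pvHexDigit (n : Nat) : Char := if n < 10 then Char.ofNat (48 + n) else Char.ofNat (87 + n)

def pvHexChars (n : Nat) : List Char :=
  if h : n < 16 then [pvHexDigit n]
  else pvHexChars (n / 16) ++ [pvHexDigit (n % 16)]
decreasing_by exact Nat.div_lt_self (by omega) (by omega)

def pvFmt02x (b : Int) : List Char :=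
  if b < 0 then '-' :: pvHexChars b.natAbs
  else if (pvHexChars b.toNat).length = 1 then '0' :: pvHexChars b.toNat
  else pvHexChars b.toNat

-- A's f"0x{byte:02x}, "
def pvTok (b : Int) : List Char := '0' :: 'x' :: (pvFmt02x b ++ [',', ' '])

-- A's for-loop over enumerate(data) with state (decl, line)
def pvLoopA : List Int → List (List Char) → List Char → Nat → List (List Char) × List Char
  | [], decl, line, _ => (decl, line)
  | b :: rest, decl, line, i =>
    let line' := line ++ pvTok b
    if (i + 1) % 16 = 0 then pvLoopA rest (decl ++ [line']) [' ', ' '] (i + 1)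
    else pvLoopA rest decl line' (i + 1)

-- exact hand port of str.rstrip(", "): drop trailing characters that are ',' or ' '
def pvRstripCommaSpace (cs : List Char) : List Char :=
  (cs.reverse.dropWhile (fun c => c == ',' || c == ' ')).reverse

def generate_cpp_array (name : String) (data : List Int) : String :=
  let header := "const uint8_t ".toList ++ name.toList ++ "[] PROGMEM __attribute__((aligned(4))) = {".toList
  let r := pvLoopA data [header] [' ', ' '] 0
  let decl := if PySem.Chars.strip r.2 ≠ [] then r.1 ++ [pvRstripCommaSpace r.2] else r.1
  let decl := decl ++ ["};".toList,
    "const size_t ".toList ++ name.toList ++ "_LEN = ".toList ++ PySem.Int.toChars (PySem.List.len data) ++ [';'],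
    "const char ".toList ++ name.toList ++ "_MIME[] = \"text/html\";".toList,
    "const bool ".toList ++ name.toList ++ "_GZIPPED = true;".toList]
  String.mk (PySem.Chars.join ['\n'] decl)

-- ===== PORT B =====
-- B's f"0x{b:02x}" (no trailing comma)
def pvTokB (b : Int) : List Char := '0' :: 'x' :: pvFmt02x b

-- one row: a full 16-byte chunk keeps every ", "; a partial chunk is joined with ", "
def pvRowB (c : List Int) : List Char :=
  if c.length = 16 then [' ', ' '] ++ PySem.Chars.join [] (c.map (fun b => pvTokB b ++ [',', ' ']))
  else [' ', ' '] ++ PySem.Chars.join [',', ' '] (c.map pvTokB)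

def generate_cpp_array_alt (name : String) (data : List Int) : String :=
  let chunks := (PySem.List.pyRange 0 (PySem.List.len data) 16).map
    (fun i => PySem.List.slice data (some i) (some (i + 16)))
  let rows := chunks.map pvRowB
  let head := "const uint8_t ".toList ++ name.toList ++ "[] PROGMEM __attribute__((aligned(4))) = {".toList
  let tail := ["};".toList,
    "const size_t ".toList ++ name.toList ++ "_LEN = ".toList ++ PySem.Int.toChars (PySem.List.len data) ++ [';'],
    "const char ".toList ++ name.toList ++ "_MIME[] = \"text/html\";".toList,
    "const bool ".toList ++ name.toList ++ "_GZIPPED = true;".toList]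
  String.mk (PySem.Chars.join ['\n'] (head :: (rows ++ tail)))

-- ===== PRECONDITION & SPEC =====
def Spec_generate_cpp_array (name : String) (data : List Int) (out : String) : Prop := out = generate_cpp_array_alt name data
instance (name : String) (data : List Int) (out : String) : Decidable (Spec_generate_cpp_array name data out) := by unfold Spec_generate_cpp_array; infer_instance

-- ===== CLAIM (what is proved, stated in full; the proofs are below) =====
def Claim_equal_generate_cpp_array : Prop := ∀ (name : String) (data : List Int), Dom_generate_cpp_array name data → Spec_generate_cpp_array name data (generate_cpp_array name data)

-- ===== LEMMAS AND PROOFS =====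

-- A's trailing "if line.strip(): decl.append(line.rstrip(', '))" as a function of the loop result
def pvAfin (r : List (List Char) × List Char) : List (List Char) :=
  if PySem.Chars.strip r.2 ≠ [] then r.1 ++ [pvRstripCommaSpace r.2] else r.1

-- the 16-byte chunks of l, structurally
def pvChunks (l : List Int) : List (List Int) :=
  if h : l = [] then [] else l.take 16 :: pvChunks (l.drop 16)
termination_by l.length
decreasing_by simp [List.length_drop]; exact List.length_pos_of_ne_nil h

lemma pvLoopA_mod (l : List Int) : ∀ (decl : List (List Char)) (line : List Char) (i : Nat),
    pvLoopA l decl line i = pvLoopA l decl line (i % 16) := by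
  induction l with
  | nil => intro decl line i; rfl
  | cons b rest ih =>
    intro decl line i
    have hm : (i % 16 + 1) % 16 = (i + 1) % 16 := by omega
    simp only [pvLoopA, hm]
    by_cases h : (i + 1) % 16 = 0
    · simp only [h, if_true]
      rw [ih]; conv_rhs => rw [ih, hm]
    · simp only [h, if_false]
      rw [ih]; conv_rhs => rw [ih, hm]

lemma pvRun_partial (l : List Int) : ∀ (j : Nat) (decl : List (List Char)) (line : List Char),
    j + l.length < 16 → pvLoopA l decl line j = (decl, line ++ (l.map pvTok).flatten) := by
  induction l with
  | nil => intro j decl line _; simp [pvLoopA]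
  | cons b rest ih =>
    intro j decl line h
    simp only [List.length_cons] at h
    have h1 : (j + 1) % 16 ≠ 0 := by omega
    simp only [pvLoopA, if_neg h1]
    rw [ih (j + 1) decl (line ++ pvTok b) (by omega)]
    simp

lemma pvRun_chunk (l : List Int) : ∀ (j : Nat) (decl : List (List Char)) (line : List Char) (rest : List Int),
    l ≠ [] → j + l.length = 16 →
    pvLoopA (l ++ rest) decl line j
      = pvLoopA rest (decl ++ [line ++ (l.map pvTok).flatten]) [' ', ' '] 16 := by
  induction l with
  | nil => intro _ _ _ _ hne _; exact absurd rfl hne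
  | cons b bs ih =>
    intro j decl line rest _ h
    simp only [List.length_cons] at h
    cases bs with
    | nil =>
      simp only [List.length_nil] at h
      have hj : j = 15 := by omega
      subst hj
      simp [pvLoopA]
    | cons c cs =>
      have h1 : (j + 1) % 16 ≠ 0 := by
        simp only [List.length_cons] at h; omega
      rw [List.cons_append, pvLoopA]
      simp only [if_neg h1]
      rw [ih (j + 1) decl (line ++ pvTok b) rest (by simp)
        (by simp only [List.length_cons] at h ⊢; omega)]
      simp

lemma pvHex_last (n : Nat) : ∃ y, pvHexChars n = y ++ [pvHexDigit (n % 16)] := by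
  by_cases h : n < 16
  · exact ⟨[], by rw [pvHexChars]; simp [h, Nat.mod_eq_of_lt h]⟩
  · exact ⟨pvHexChars (n / 16), by rw [pvHexChars]; simp [h]⟩

lemma pvHexDigit_ok (m : Nat) (h : m < 16) : (pvHexDigit m == ',' || pvHexDigit m == ' ') = false := by
  interval_cases m <;> decide

lemma pvTokB_last (b : Int) : ∃ y d, pvTokB b = y ++ [d] ∧ (d == ',' || d == ' ') = false := by
  have hok : ∀ m : Nat, (pvHexDigit (m % 16) == ',' || pvHexDigit (m % 16) == ' ') = false :=
    fun m => pvHexDigit_ok _ (Nat.mod_lt _ (by omega))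
  by_cases hb : b < 0
  · obtain ⟨y, hy⟩ := pvHex_last b.natAbs
    refine ⟨'0' :: 'x' :: '-' :: y, pvHexDigit (b.natAbs % 16), ?_, hok _⟩
    simp only [pvTokB, pvFmt02x, if_pos hb]
    rw [hy]; simp
  · obtain ⟨y, hy⟩ := pvHex_last b.toNat
    by_cases hl : (pvHexChars b.toNat).length = 1
    · refine ⟨'0' :: 'x' :: '0' :: y, pvHexDigit (b.toNat % 16), ?_, hok _⟩
      simp only [pvTokB, pvFmt02x, if_neg hb, if_pos hl]
      rw [hy]; simp
    · refine ⟨'0' :: 'x' :: y, pvHexDigit (b.toNat % 16), ?_, hok _⟩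
      simp only [pvTokB, pvFmt02x, if_neg hb, if_neg hl]
      rw [hy]; simp

lemma pvJoinB_last (l : List Int) (h : l ≠ []) :
    ∃ y d, PySem.Chars.join [',', ' '] (l.map pvTokB) = y ++ [d] ∧ (d == ',' || d == ' ') = false := by
  induction l with
  | nil => exact absurd rfl h
  | cons b bs ih =>
    cases bs with
    | nil =>
      obtain ⟨y, d, hy, hd⟩ := pvTokB_last b
      exact ⟨y, d, by simp [PySem.Chars.join_singleton, hy], hd⟩
    | cons c cs =>
      obtain ⟨y, d, hy, hd⟩ := ih (by simp)
      refine ⟨pvTokB b ++ [',', ' '] ++ y, d, ?_, hd⟩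
      rw [List.map_cons, List.map_cons, PySem.Chars.join_cons_cons]
      rw [List.map_cons] at hy
      rw [hy]; simp

lemma pvRstrip_snoc (z : List Char) (d : Char) (h : (d == ',' || d == ' ') = false) :
    pvRstripCommaSpace ((z ++ [d]) ++ [',', ' ']) = z ++ [d] := by
  simp [pvRstripCommaSpace, List.dropWhile, h]

lemma pvJoin_nil_sep (ps : List (List Char)) : PySem.Chars.join [] ps = ps.flatten := by
  induction ps with
  | nil => simp [PySem.Chars.join_nil]
  | cons p ps ih =>
    cases ps with
    | nil => simp [PySem.Chars.join_singleton]
    | cons q rest => rw [PySem.Chars.join_cons_cons, ih]; simp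

lemma pvTok_eq (b : Int) : pvTok b = pvTokB b ++ [',', ' '] := by
  simp [pvTok, pvTokB]

lemma pvFlat_eq (l : List Int) (h : l ≠ []) :
    (l.map pvTok).flatten = PySem.Chars.join [',', ' '] (l.map pvTokB) ++ [',', ' '] := by
  induction l with
  | nil => exact absurd rfl h
  | cons b bs ih =>
    cases bs with
    | nil => simp [PySem.Chars.join_singleton, pvTok_eq]
    | cons c cs =>
      have ih' := ih (by simp)
      simp only [List.map_cons, List.flatten_cons] at ih' ⊢
      rw [ih', PySem.Chars.join_cons_cons, pvTok_eq]
      simp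

lemma pvStrip_row (rest : List Char) : PySem.Chars.strip (' ' :: ' ' :: '0' :: 'x' :: rest) ≠ [] := by
  have hsp : PySem.Chars.isspace ' ' = true := by decide
  have h0 : PySem.Chars.isspace '0' = false := by decide
  simp only [PySem.Chars.strip, PySem.Chars.lstrip, PySem.Chars.rstrip,
    List.dropWhile_cons, hsp, h0, if_true, if_false]
  intro hc
  rw [List.reverse_eq_nil_iff] at hc
  have := List.dropWhile_eq_nil_iff.mp hc ('0') (by simp)
  simp [h0] at this

lemma pvChunks_closed (l : List Int) :
    pvChunks l = (List.range ((l.length + 15) / 16)).map (fun k => (l.drop (16 * k)).take 16) := by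
  by_cases h : l = []
  · subst h; rw [pvChunks]; simp
  · rw [pvChunks, dif_neg h]
    have hlen : 1 ≤ l.length := List.length_pos_of_ne_nil h
    have hcount : (l.length + 15) / 16 = ((l.drop 16).length + 15) / 16 + 1 := by
      simp only [List.length_drop]; omega
    rw [pvChunks_closed (l.drop 16), hcount, List.range_succ_eq_map]
    simp only [List.map_cons, List.map_map, Function.comp_def, Nat.mul_zero, List.drop_zero]
    congr 1
    refine List.map_congr_left (fun k _ => ?_)
    rw [List.drop_drop]
    congr 2
    omega
termination_by l.length
decreasing_by simp [List.length_drop]; exact List.length_pos_of_ne_nil h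

lemma pvSlicesB (l : List Int) :
    (PySem.List.pyRange 0 (PySem.List.len l) 16).map (fun i => PySem.List.slice l (some i) (some (i + 16)))
      = (List.range ((l.length + 15) / 16)).map (fun k => (l.drop (16 * k)).take 16) := by
  rw [PySem.List.len_eq, PySem.List.pyRange_of_pos 0 (l.length : Int) (by norm_num)]
  have hcount : (if (0 : Int) < (l.length : Int) then (((l.length : Int) - 0 + 16 - 1) / 16).toNat else 0)
      = (l.length + 15) / 16 := by
    split <;> omega
  rw [hcount, List.map_map]
  refine List.map_congr_left (fun k _ => ?_)
  simp only [Function.comp_def, zero_add]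
  rw [PySem.List.slice_toNat l (by positivity) (by positivity)]
  have h1 : ((16 : Int) * (k : Int)).toNat = 16 * k := by omega
  have h2 : ((16 : Int) * (k : Int) + 16).toNat = 16 * k + 16 := by omega
  rw [h1, h2]
  congr 1
  omega

lemma pvChunks_nil : pvChunks ([] : List Int) = [] := by
  rw [pvChunks]; simp

lemma pvRowB_full (c : List Int) (h : c.length = 16) :
    pvRowB c = [' ', ' '] ++ (c.map pvTok).flatten := by
  rw [pvRowB, if_pos h, pvJoin_nil_sep]
  have : (fun b => pvTokB b ++ [',', ' ']) = pvTok := by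
    funext b; rw [pvTok_eq]
  rw [this]

lemma pvAmain : ∀ (n : Nat) (l : List Int), l.length ≤ n → ∀ (decl : List (List Char)),
    pvAfin (pvLoopA l decl [' ', ' '] 0) = decl ++ (pvChunks l).map pvRowB := by
  intro n
  induction n with
  | zero =>
    intro l hl decl
    have : l = [] := List.length_eq_zero_iff.mp (by omega)
    subst this
    rw [pvChunks_nil]
    simp only [List.map_nil, List.append_nil]
    show pvAfin (decl, [' ', ' ']) = decl
    simp [pvAfin, show PySem.Chars.strip [' ', ' '] = [] from by decide]
  | succ n ih =>
    intro l hl decl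
    by_cases h16 : 16 ≤ l.length
    · have htk : (l.take 16).length = 16 := by simp [List.length_take]; omega
      have hne : l.take 16 ≠ [] := by
        intro hc; rw [hc] at htk; simp at htk
      conv_lhs => rw [← List.take_append_drop 16 l]
      rw [pvRun_chunk (l.take 16) 0 decl [' ', ' '] (l.drop 16) hne (by omega),
        pvLoopA_mod]
      norm_num
      rw [ih (l.drop 16) (by simp [List.length_drop]; omega)]
      conv_rhs => rw [pvChunks]
      have hlne : l ≠ [] := by intro hc; subst hc; simp at h16
      simp only [dif_neg hlne, List.map_cons]
      rw [pvRowB_full (l.take 16) htk]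
      simp
    · cases l with
      | nil =>
        rw [pvChunks_nil]
        simp only [List.map_nil, List.append_nil]
        show pvAfin (decl, [' ', ' ']) = decl
        simp [pvAfin, show PySem.Chars.strip [' ', ' '] = [] from by decide]
      | cons b bs =>
        rw [pvRun_partial (b :: bs) 0 decl [' ', ' '] (by simp at h16 ⊢; omega)]
        have hshape : [' ', ' '] ++ ((b :: bs).map pvTok).flatten
            = ' ' :: ' ' :: '0' :: 'x' :: (pvFmt02x b ++ [',', ' '] ++ (bs.map pvTok).flatten) := by
          simp [pvTok]
        obtain ⟨y, d, hy, hd⟩ := pvJoinB_last (b :: bs) (by simp)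
        have hflat := pvFlat_eq (b :: bs) (by simp)
        have hrs : pvRstripCommaSpace ([' ', ' '] ++ ((b :: bs).map pvTok).flatten)
            = [' ', ' '] ++ PySem.Chars.join [',', ' '] ((b :: bs).map pvTokB) := by
          rw [hflat, hy]
          have : [' ', ' '] ++ (y ++ [d] ++ [',', ' ']) = (([' ', ' '] ++ y) ++ [d]) ++ [',', ' '] := by simp
          rw [this, pvRstrip_snoc _ _ hd]
          simp
        rw [pvAfin]
        simp only [hshape, ne_eq]
        rw [if_pos (by exact pvStrip_row _)]
        rw [← hshape, hrs]
        conv_rhs => rw [pvChunks]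
        have hlen : (b :: bs).length < 16 := by omega
        simp only [dif_neg (by simp : (b :: bs) ≠ []), List.map_cons]
        rw [List.take_of_length_le (by omega), List.drop_eq_nil_of_le (by omega)]
        rw [pvChunks_nil]
        rw [pvRowB, if_neg (by omega)]
        simp

-- ===== VERDICT (by name: the statement is the Claim_ definition above) =====
theorem generate_cpp_array_spec : Claim_equal_generate_cpp_array := by
  intro name data _
  unfold Spec_generate_cpp_array generate_cpp_array generate_cpp_array_alt
  rw [pvSlicesB, ← pvChunks_closed]
  have h := pvAmain data.length data le_rfl
    ["const uint8_t ".toList ++ name.toList ++ "[] PROGMEM __attribute__((aligned(4))) = {".toList]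
  simp only [pvAfin] at h
  simp only [h]
  simp
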